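-- pv_equiv track=rewrite | github.com/Katzuno/BACKEND-Automation-Testing-with-Computer-Vision | elements.py | intersect_pages_by_elements
-- ===== SOURCE A (Python) =====
-- def intersect_pages_by_elements(all_pages, elements_coord, pages):
--     elements_on_page_coordinates = []
--     elements_on_page_name = []
--
--     for eid in elements_coord.keys():
--         if elements_coord[eid] != [(0, 0), (0, 0)]:
--             elements_on_page_name.append(eid)
--             elements_on_page_coordinates.append(elements_coord[eid])
--             all_pages = all_pages.intersection(pages[eid])
--
--     return elements_on_page_name, elements_on_page_coordinates, all_pages
-- ===== SOURCE B (Python) =====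
-- def intersect_pages_by_elements(all_pages, elements_coord, pages):
--     names = [eid for eid, coords in elements_coord.items()
--              if coords != [(0, 0), (0, 0)]]
--     coordinates = [elements_coord[eid] for eid in names]
--     result_pages = {p for p in all_pages
--                     if all(p in pages[eid] for eid in names)}
--     return names, coordinates, result_pages
-- ===== Notes on version B (the rewrite author's own statement) =====
-- stated objective: alternative
-- what changed: B never calls set.intersection: it keeps the non-placeholder names by comprehension, re-looks up their coordinates, and computes the surviving pages with the loop nesting inverted - a membership test of each page of all_pages against every kept element's page set - instead of A's fused loop that folds set.intersection while appending to both lists.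
import Mathlib
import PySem

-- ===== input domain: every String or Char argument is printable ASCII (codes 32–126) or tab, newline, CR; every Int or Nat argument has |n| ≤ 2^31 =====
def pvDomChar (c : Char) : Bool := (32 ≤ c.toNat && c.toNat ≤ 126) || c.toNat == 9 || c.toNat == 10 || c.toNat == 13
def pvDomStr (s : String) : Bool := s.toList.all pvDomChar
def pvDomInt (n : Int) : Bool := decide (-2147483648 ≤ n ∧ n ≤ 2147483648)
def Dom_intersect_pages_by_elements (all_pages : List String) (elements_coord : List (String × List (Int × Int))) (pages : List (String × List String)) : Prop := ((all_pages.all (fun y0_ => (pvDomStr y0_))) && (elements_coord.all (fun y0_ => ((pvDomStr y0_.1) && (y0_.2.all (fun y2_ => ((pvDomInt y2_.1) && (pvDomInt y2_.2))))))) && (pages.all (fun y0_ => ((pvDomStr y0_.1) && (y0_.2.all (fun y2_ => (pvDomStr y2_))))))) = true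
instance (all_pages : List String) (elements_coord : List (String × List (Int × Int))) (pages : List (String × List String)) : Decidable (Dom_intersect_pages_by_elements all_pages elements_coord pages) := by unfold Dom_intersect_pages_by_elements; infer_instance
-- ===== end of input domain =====

-- B drops set.intersection entirely: it filters the kept element names, re-looks up their
-- coordinates, and keeps a page of all_pages iff it is a member of EVERY kept element's page
-- set (inverted loop nesting), instead of A's fused loop folding set.intersection (objective:
-- alternative). Return-value equivalence only.

-- ===== PORT A =====
def intersect_pages_by_elements (all_pages : List String) (elements_coord : List (String × List (Int × Int))) (pages : List (String × List String)) : List String × (List (List (Int × Int))) × List String :=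
  -- for eid in elements_coord.keys(): …  (dict lookups elements_coord[eid] / pages[eid] via Dict.get?;
  -- '.getD []' is only reached outside Pre_, where Python raises KeyError)
  let r := elements_coord.foldl
    (fun (st : List String × List (List (Int × Int)) × List String) p =>
      let v := ((PySem.Dict.mk elements_coord).get? p.1).getD []
      if v ≠ [((0:Int),(0:Int)), ((0:Int),(0:Int))] then
        (st.1 ++ [p.1], st.2.1 ++ [v], PySem.Set.inter st.2.2 (((PySem.Dict.mk pages).get? p.1).getD []))
      else st)
    ([], [], all_pages)
  (r.1, r.2.1, r.2.2)

-- ===== PORT B =====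
def intersect_pages_by_elements_alt (all_pages : List String) (elements_coord : List (String × List (Int × Int))) (pages : List (String × List String)) : List String × (List (List (Int × Int))) × List String :=
  -- the set comprehension over the set all_pages is ported as a filter of its (distinct) elements
  let names := (elements_coord.filter (fun p => decide (p.2 ≠ [((0:Int),(0:Int)), ((0:Int),(0:Int))]))).map Prod.fst
  let coordinates := names.map (fun eid => ((PySem.Dict.mk elements_coord).get? eid).getD [])
  let result_pages := all_pages.filter
    (fun p => names.all (fun eid => PySem.Set.contains (((PySem.Dict.mk pages).get? eid).getD []) p))
  (names, coordinates, result_pages)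

-- ===== PRECONDITION & SPEC =====
-- Pre_ excludes (i) inputs where some kept eid is missing from pages, on which Python A raises
-- KeyError (B raises there too), and (ii) association lists with duplicate keys in either dict
-- argument, which do not correspond to the Python dict built from them (dict overwrites duplicates).
def Pre_intersect_pages_by_elements (all_pages : List String) (elements_coord : List (String × List (Int × Int))) (pages : List (String × List String)) : Prop :=
  (elements_coord.map Prod.fst).Nodup ∧ (pages.map Prod.fst).Nodup ∧
  ∀ p ∈ elements_coord, p.2 ≠ [((0:Int),(0:Int)), ((0:Int),(0:Int))] → p.1 ∈ pages.map Prod.fst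
instance (all_pages : List String) (elements_coord : List (String × List (Int × Int))) (pages : List (String × List String)) : Decidable (Pre_intersect_pages_by_elements all_pages elements_coord pages) := by unfold Pre_intersect_pages_by_elements; infer_instance
def pvWitness_intersect_pages_by_elements : List String × (List (String × List (Int × Int))) × (List (String × List String)) :=
  (["p1", "p2"], [("e1", [(1, 1), (2, 2)]), ("e2", [(0, 0), (0, 0)])], [("e1", ["p1"])])

def Spec_intersect_pages_by_elements (all_pages : List String) (elements_coord : List (String × List (Int × Int))) (pages : List (String × List String)) (out : List String × (List (List (Int × Int))) × List String) : Prop := out = intersect_pages_by_elements_alt all_pages elements_coord pages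
instance (all_pages : List String) (elements_coord : List (String × List (Int × Int))) (pages : List (String × List String)) (out : List String × (List (List (Int × Int))) × List String) : Decidable (Spec_intersect_pages_by_elements all_pages elements_coord pages out) := by unfold Spec_intersect_pages_by_elements; infer_instance

-- ===== CLAIM (what is proved, stated in full; the proofs are below) =====
def Claim_equal_intersect_pages_by_elements : Prop := ∀ (all_pages : List String) (elements_coord : List (String × List (Int × Int))) (pages : List (String × List String)), Dom_intersect_pages_by_elements all_pages elements_coord pages → Pre_intersect_pages_by_elements all_pages elements_coord pages → Spec_intersect_pages_by_elements all_pages elements_coord pages (intersect_pages_by_elements all_pages elements_coord pages)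

-- ===== LEMMAS AND PROOFS =====

-- under nodup keys, the dict lookup of a pair's own key returns that pair's value
theorem pv_get?_self (l : List (String × List (Int × Int))) (h : (l.map Prod.fst).Nodup)
    (p : String × List (Int × Int)) (hp : p ∈ l) :
    (PySem.Dict.mk l).get? p.1 = some p.2 := by
  apply PySem.Dict.get?_of_mem_items (k := p.1) (v := p.2)
  · simpa using hp
  · simpa [PySem.Dict.keys] using h

-- A's fused fold, with the per-element dict lookup abstracted as 'look', yields the filtered
-- names, the filtered coordinates and the iterated intersection over the kept names
theorem pv_fold_split (pgs : List (String × List String)) (look : String → List (Int × Int)) :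
    ∀ (l : List (String × List (Int × Int))), (∀ p ∈ l, look p.1 = p.2) →
    ∀ (ns : List String) (cs : List (List (Int × Int))) (ap : List String),
    l.foldl (fun (st : List String × List (List (Int × Int)) × List String) p =>
        if look p.1 ≠ [((0:Int),(0:Int)), ((0:Int),(0:Int))] then
          (st.1 ++ [p.1], st.2.1 ++ [look p.1], PySem.Set.inter st.2.2 (((PySem.Dict.mk pgs).get? p.1).getD []))
        else st) (ns, cs, ap)
    = (ns ++ ((l.filter (fun p => decide (p.2 ≠ [((0:Int),(0:Int)), ((0:Int),(0:Int))]))).map Prod.fst),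
       cs ++ ((l.filter (fun p => decide (p.2 ≠ [((0:Int),(0:Int)), ((0:Int),(0:Int))]))).map Prod.snd),
       (((l.filter (fun p => decide (p.2 ≠ [((0:Int),(0:Int)), ((0:Int),(0:Int))]))).map Prod.fst).foldl
         (fun acc eid => PySem.Set.inter acc (((PySem.Dict.mk pgs).get? eid).getD [])) ap)) := by
  intro l
  induction l with
  | nil => intro _ ns cs ap; simp
  | cons p t ih =>
    intro hl ns cs ap
    have hp : look p.1 = p.2 := hl p (List.mem_cons_self ..)
    have ht : ∀ q ∈ t, look q.1 = q.2 := fun q hq => hl q (List.mem_cons_of_mem _ hq)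
    by_cases hz : p.2 = [((0:Int),(0:Int)), ((0:Int),(0:Int))]
    · simp only [List.foldl_cons, List.filter_cons, hp, hz, ne_eq, not_true_eq_false, if_false,
        decide_false]
      exact ih ht ns cs ap
    · simp only [List.foldl_cons, List.filter_cons, hp, hz, ne_eq, not_false_eq_true, if_true,
        decide_true, List.map_cons, List.foldl_cons]
      rw [ih ht]
      simp [List.append_assoc]

-- the iterated intersection over names equals one filter of the start set by membership in
-- every name's page set (B's inverted loop)
theorem pv_fold_inter_eq_filter_all (g : String → List String) :
    ∀ (names : List String) (ap : List String),
    names.foldl (fun acc eid => PySem.Set.inter acc (g eid)) ap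
    = ap.filter (fun p => names.all (fun eid => PySem.Set.contains (g eid) p)) := by
  intro names
  induction names with
  | nil => intro ap; simp
  | cons h t ih =>
    intro ap
    rw [List.foldl_cons, ih]
    simp only [PySem.Set.inter, List.filter_filter, List.all_cons]
    exact List.filter_congr (fun p _ => by simp [Bool.and_comm])

-- ===== VERDICT (by name: the statement is the Claim_ definition above) =====
theorem intersect_pages_by_elements_spec : Claim_equal_intersect_pages_by_elements := by
  intro all_pages elements_coord pages _ hpre
  unfold Spec_intersect_pages_by_elements
  unfold intersect_pages_by_elements intersect_pages_by_elements_alt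
  have hlook : ∀ p ∈ elements_coord,
      (fun s => ((PySem.Dict.mk elements_coord).get? s).getD []) p.1 = p.2 := by
    intro p hp
    simp only
    rw [pv_get?_self elements_coord hpre.1 p hp]
    rfl
  have h := pv_fold_split pages (fun s => ((PySem.Dict.mk elements_coord).get? s).getD [])
    elements_coord hlook [] [] all_pages
  simp only [List.nil_append] at h
  rw [h, pv_fold_inter_eq_filter_all]
  simp only [Prod.mk.injEq, List.map_map, true_and, and_true]
  refine List.map_congr_left (fun p hpF => ?_)
  have hp : p ∈ elements_coord := List.mem_of_mem_filter hpF
  simp [Function.comp, hlook p hp]
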